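-- pv_equiv track=rewrite | github.com/omoinjm/njmtech-knowledge-base | apps/upload-blob/api/runtime/blob_client.py | _sanitize_blob_path
-- ===== SOURCE A (Python) =====
-- def _sanitize_path_segment(segment: str) -> str:
--     cleaned = []
--     last_was_sep = False
--     for char in (segment or ""):
--         if char.isalnum() or char in {".", "_", "-"}:
--             cleaned.append(char)
--             last_was_sep = False
--         else:
--             if not last_was_sep:
--                 cleaned.append("_")
--                 last_was_sep = True
--     sanitized = "".join(cleaned).strip("._-")
--     return sanitized
--
-- def _sanitize_blob_path(blob_path: str) -> str:
--     parts = [p for p in (blob_path or "").split("/") if p]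
--     cleaned_parts = []
--     for part in parts:
--         cleaned = _sanitize_path_segment(part)
--         if cleaned:
--             cleaned_parts.append(cleaned)
--     return "/".join(cleaned_parts)
-- ===== SOURCE B (Python) =====
-- def _valid(c: str) -> bool:
--     return c.isalnum() or c in "._-"
--
--
-- def _sanitize_path_segment(segment: str) -> str:
--     s = segment or ""
--     n = len(s)
--     out = []
--     i = 0
--     while i < n:
--         k = _valid(s[i])
--         j = i + 1
--         while j < n and _valid(s[j]) == k:
--             j += 1
--         out.append(s[i:j] if k else "_")
--         i = j
--     return "".join(out).strip("._-")
--
--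
-- def _sanitize_blob_path(blob_path: str) -> str:
--     parts = [p for p in (blob_path or "").split("/") if p]
--     cleaned = [c for c in map(_sanitize_path_segment, parts) if c]
--     return "/".join(cleaned)
-- ===== Notes on version B (the rewrite author's own statement) =====
-- stated objective: alternative
-- what changed: The per-character state machine with the last_was_sep flag is replaced by a run-based two-pointer scanner that slices each maximal run of same-validity characters at once, emitting the run itself or a single underscore.
import Mathlib
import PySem

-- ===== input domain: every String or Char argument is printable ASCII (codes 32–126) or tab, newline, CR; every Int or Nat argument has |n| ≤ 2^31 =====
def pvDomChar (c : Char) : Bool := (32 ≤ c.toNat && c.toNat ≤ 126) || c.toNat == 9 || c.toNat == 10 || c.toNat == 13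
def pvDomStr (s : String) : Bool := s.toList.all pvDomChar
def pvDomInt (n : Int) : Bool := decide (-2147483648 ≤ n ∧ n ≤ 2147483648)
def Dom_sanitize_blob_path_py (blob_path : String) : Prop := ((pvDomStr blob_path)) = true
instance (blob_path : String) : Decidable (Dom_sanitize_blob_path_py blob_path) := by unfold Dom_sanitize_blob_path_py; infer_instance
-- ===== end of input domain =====

-- B replaces A's per-character last_was_sep state machine by a run-based scanner
-- (maximal same-validity runs emitted whole, invalid runs as one underscore); alternative, same cost.


-- ===== PORT A =====
-- char.isalnum() or char in {".", "_", "-"}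
def pvValid (c : Char) : Bool := PySem.Chars.isalnum c || c == '.' || c == '_' || c == '-'

-- the for-loop of _sanitize_path_segment, state (cleaned, last_was_sep)
def pvSegLoopA : List Char → List Char → Bool → List Char
  | [], cleaned, _ => cleaned
  | c :: rest, cleaned, lastSep =>
    if pvValid c then pvSegLoopA rest (cleaned ++ [c]) false
    else if !lastSep then pvSegLoopA rest (cleaned ++ ['_']) true
    else pvSegLoopA rest cleaned lastSep

def pvSanitizeSegA (seg : List Char) : List Char :=
  PySem.Chars.stripChars (pvSegLoopA seg [] false) ['.', '_', '-']

def sanitize_blob_path_py (blob_path : String) : String :=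
  let parts := (PySem.Chars.splitOn blob_path.toList ['/']).filter (fun p => !p.isEmpty)
  let cleanedParts := parts.foldl (fun acc part =>
    let cleaned := pvSanitizeSegA part
    if !cleaned.isEmpty then acc ++ [cleaned] else acc) []
  String.ofList (PySem.Chars.join ['/'] cleanedParts)

-- ===== PORT B =====
-- Source B's inner while-loop: the maximal run of characters with the same validity as the head
def pvRuns : List Char → List (Bool × List Char)
  | [] => []
  | c :: rest =>
    (pvValid c, c :: rest.takeWhile (fun d => pvValid d == pvValid c)) ::
      pvRuns (rest.dropWhile (fun d => pvValid d == pvValid c))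
  termination_by l => l.length
  decreasing_by
    simpa using Nat.lt_succ_of_le (List.length_dropWhile_le _ _)

def pvSanitizeSegB (seg : List Char) : List Char :=
  PySem.Chars.stripChars
    (((pvRuns seg).map (fun g => if g.1 then g.2 else ['_'])).flatten) ['.', '_', '-']

def sanitize_blob_path_py_alt (blob_path : String) : String :=
  let parts := (PySem.Chars.splitOn blob_path.toList ['/']).filter (fun p => !p.isEmpty)
  let cleaned := (parts.map pvSanitizeSegB).filter (fun c => !c.isEmpty)
  String.ofList (PySem.Chars.join ['/'] cleaned)

-- ===== PRECONDITION & SPEC =====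
def Spec_sanitize_blob_path_py (blob_path : String) (out : String) : Prop := out = sanitize_blob_path_py_alt blob_path
instance (blob_path : String) (out : String) : Decidable (Spec_sanitize_blob_path_py blob_path out) := by unfold Spec_sanitize_blob_path_py; infer_instance

-- ===== CLAIM (what is proved, stated in full; the proofs are below) =====
def Claim_equal_sanitize_blob_path_py : Prop := ∀ (blob_path : String), Dom_sanitize_blob_path_py blob_path → Spec_sanitize_blob_path_py blob_path (sanitize_blob_path_py blob_path)

-- ===== LEMMAS AND PROOFS =====

-- the loop only appends to its accumulator
theorem pvSegLoopA_acc (l : List Char) : ∀ (acc : List Char) (b : Bool),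
    pvSegLoopA l acc b = acc ++ pvSegLoopA l [] b := by
  induction l with
  | nil => intro acc b; simp [pvSegLoopA]
  | cons c rest ih =>
    intro acc b
    by_cases hv : pvValid c = true
    · simp only [pvSegLoopA, hv, if_pos, List.nil_append]
      rw [ih (acc ++ [c]), ih [c]]; simp
    · cases b with
      | false =>
        simp only [pvSegLoopA, if_neg hv, Bool.not_false, if_pos, List.nil_append]
        rw [ih (acc ++ ['_']), ih ['_']]; simp
      | true =>
        simp only [pvSegLoopA, if_neg hv, Bool.not_true, Bool.false_eq_true, if_false]
        exact ih acc true

-- a fully valid prefix passes straight through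
theorem pvSegLoopA_valid_run (run t : List Char) (h : ∀ c ∈ run, pvValid c = true) :
    pvSegLoopA (run ++ t) [] false = run ++ pvSegLoopA t [] false := by
  induction run with
  | nil => simp
  | cons c r ih =>
    have hc : pvValid c = true := h c (by simp)
    simp only [List.cons_append, pvSegLoopA, hc, if_pos, List.nil_append]
    rw [pvSegLoopA_acc, ih (fun d hd => h d (by simp [hd]))]
    simp

-- a fully invalid prefix is skipped when last_was_sep is already set
theorem pvSegLoopA_invalid_run (run t : List Char) (h : ∀ c ∈ run, pvValid c = false) :
    pvSegLoopA (run ++ t) [] true = pvSegLoopA t [] true := by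
  induction run with
  | nil => simp
  | cons c r ih =>
    have hc : pvValid c = false := h c (by simp)
    simp only [List.cons_append, pvSegLoopA, hc, Bool.false_eq_true, if_false,
      Bool.not_true, if_false]
    exact ih (fun d hd => h d (by simp [hd]))

def pvBJoin (l : List Char) : List Char :=
  ((pvRuns l).map (fun g => if g.1 then g.2 else ['_'])).flatten

theorem pvMain : ∀ (n : Nat) (l : List Char), l.length ≤ n →
    pvSegLoopA l [] false = pvBJoin l ∧
      pvSegLoopA l [] true = pvBJoin (l.dropWhile (fun c => !pvValid c)) := by
  intro n
  induction n with
  | zero =>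
    intro l hl
    have : l = [] := List.length_eq_zero_iff.mp (Nat.le_zero.mp hl)
    subst this
    exact ⟨by simp [pvSegLoopA, pvBJoin, pvRuns], by simp [pvSegLoopA, pvBJoin, pvRuns]⟩
  | succ n ih =>
    intro l hl
    cases l with
    | nil => exact ⟨by simp [pvSegLoopA, pvBJoin, pvRuns], by simp [pvSegLoopA, pvBJoin, pvRuns]⟩
    | cons c rest =>
      have hrest : rest.length ≤ n := Nat.le_of_succ_le_succ hl
      by_cases hv : pvValid c = true
      · -- valid head: both states behave identically
        have hjoin : pvBJoin (c :: rest) =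
            (c :: rest.takeWhile (fun d => pvValid d == pvValid c)) ++
              pvBJoin (rest.dropWhile (fun d => pvValid d == pvValid c)) := by
          rw [pvBJoin, pvRuns]
          simp only [List.map_cons, List.flatten_cons, hv, if_pos]
          rfl
        have hsplit := List.takeWhile_append_dropWhile
          (p := fun d => pvValid d == pvValid c) (l := rest)
        set run := rest.takeWhile (fun d => pvValid d == pvValid c) with hrun
        set rest' := rest.dropWhile (fun d => pvValid d == pvValid c) with hrest'
        have hrunv : ∀ d ∈ run, pvValid d = true := by
          intro d hd
          have := List.mem_takeWhile_imp hd
          simpa [hv] using this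
        have hlen' : rest'.length ≤ n :=
          le_trans (List.length_dropWhile_le _ _) hrest
        have hIH := (ih rest' hlen').1
        have hcore : pvSegLoopA rest [] false = run ++ pvBJoin rest' := by
          conv_lhs => rw [← hsplit]
          rw [pvSegLoopA_valid_run run rest' hrunv, hIH]
        constructor
        · simp only [pvSegLoopA, hv, if_pos, List.nil_append]
          rw [pvSegLoopA_acc, hcore, hjoin]; simp
        · have hd : (c :: rest).dropWhile (fun c => !pvValid c) = c :: rest := by
            simp [hv]
          rw [hd]
          simp only [pvSegLoopA, hv, if_pos, List.nil_append]
          rw [pvSegLoopA_acc, hcore, hjoin]; simp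
      · -- invalid head
        have hv' : pvValid c = false := by simpa using hv
        have hpred : (fun d => pvValid d == pvValid c) = (fun d => !pvValid d) := by
          funext d; rw [hv']; cases pvValid d <;> rfl
        have hjoin : pvBJoin (c :: rest) =
            '_' :: pvBJoin (rest.dropWhile (fun d => pvValid d == pvValid c)) := by
          rw [pvBJoin, pvRuns]
          simp only [List.map_cons, List.flatten_cons, hv', Bool.false_eq_true, if_false]
          rfl
        have hsplit := List.takeWhile_append_dropWhile
          (p := fun d => pvValid d == pvValid c) (l := rest)
        set run := rest.takeWhile (fun d => pvValid d == pvValid c) with hrun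
        set rest' := rest.dropWhile (fun d => pvValid d == pvValid c) with hrest'
        have hruni : ∀ d ∈ run, pvValid d = false := by
          intro d hd
          have := List.mem_takeWhile_imp hd
          simpa [hv'] using this
        have hlen' : rest'.length ≤ n :=
          le_trans (List.length_dropWhile_le _ _) hrest
        -- rest' is empty or starts with a valid character
        have hcore' : pvSegLoopA rest' [] true = pvBJoin rest' := by
          cases hr : rest' with
          | nil => simp [pvSegLoopA, pvBJoin, pvRuns]
          | cons d t =>
            have hdv : pvValid d = true := by
              have := List.head?_dropWhile_not (p := fun d => pvValid d == pvValid c) rest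
              rw [← hrest', hr] at this
              simp [hv'] at this
              simpa using this
            have hlen2 : (d :: t).length ≤ n := by rw [hr] at hlen'; exact hlen'
            have h1 : pvSegLoopA (d :: t) [] true = pvSegLoopA (d :: t) [] false := by
              simp [pvSegLoopA, hdv]
            rw [h1]
            exact (ih (d :: t) hlen2).1
        have htrue : pvSegLoopA rest [] true = pvBJoin rest' := by
          conv_lhs => rw [← hsplit]
          rw [pvSegLoopA_invalid_run run rest' hruni, hcore']
        constructor
        · simp only [pvSegLoopA, hv', Bool.false_eq_true, if_false, Bool.not_false,
            if_pos, List.nil_append]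
          rw [pvSegLoopA_acc, htrue, hjoin]; simp
        · have hd : (c :: rest).dropWhile (fun c => !pvValid c) =
              rest.dropWhile (fun c => !pvValid c) := by
            simp [hv']
          rw [hd, ← hpred, ← hrest']
          simp only [pvSegLoopA, hv', Bool.false_eq_true, if_false, Bool.not_true]
          exact htrue

theorem pvSeg_eq (seg : List Char) : pvSanitizeSegA seg = pvSanitizeSegB seg := by
  unfold pvSanitizeSegA pvSanitizeSegB
  rw [(pvMain seg.length seg le_rfl).1]; rfl

theorem pvFold_filter (parts : List (List Char)) : ∀ acc,
    parts.foldl (fun acc part =>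
      if !(pvSanitizeSegA part).isEmpty then acc ++ [pvSanitizeSegA part] else acc) acc =
    acc ++ (parts.map pvSanitizeSegB).filter (fun c => !c.isEmpty) := by
  induction parts with
  | nil => intro acc; simp
  | cons p ps ih =>
    intro acc
    simp only [List.foldl_cons, List.map_cons, List.filter_cons, pvSeg_eq p]
    by_cases h : (pvSanitizeSegB p).isEmpty = true
    · simp only [h, Bool.not_true, Bool.false_eq_true, if_false]
      exact ih acc
    · have h' : (!(pvSanitizeSegB p).isEmpty) = true := by simp [h]
      simp only [h', if_pos, ih (acc ++ [pvSanitizeSegB p])]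
      simp

-- ===== VERDICT (by name: the statement is the Claim_ definition above) =====
theorem sanitize_blob_path_py_spec : Claim_equal_sanitize_blob_path_py := by
  intro blob_path _
  unfold Spec_sanitize_blob_path_py sanitize_blob_path_py sanitize_blob_path_py_alt
  simp only [pvFold_filter, List.nil_append]
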